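-- pv_equiv track=rewrite | github.com/Dors-Coding-School/Coding | CodingDors Exercises/7_loops_in_strings_solutions.py | valid_vanity_plate
-- ===== SOURCE A (Python) =====
-- def valid_vanity_plate(s: str) -> bool:
-- 	for i in range(len(s)):
-- 	  if s[i].isdigit():
-- 	    if s[i:].isdigit():
-- 	      return True
-- 	    else:
-- 	      return False
-- 	# If we don't have any number, we should return True
-- 	return True
-- ===== SOURCE B (Python) =====
-- def valid_vanity_plate(s: str) -> bool:
--     seen_digit = False
--     for ch in s:
--         if seen_digit and not ch.isdigit():
--             return False
--         if ch.isdigit():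
--             seen_digit = True
--     return True
-- ===== Notes on version B (the rewrite author's own statement) =====
-- stated objective: faster
-- what changed: Replaces A's two-phase scan (index loop to find first digit, then bulk .isdigit() on the remaining slice) with a single stateful pass iterating the characters directly with a seen_digit flag, avoiding per-index s[i] lookups and the slice copy.
import Mathlib
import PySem

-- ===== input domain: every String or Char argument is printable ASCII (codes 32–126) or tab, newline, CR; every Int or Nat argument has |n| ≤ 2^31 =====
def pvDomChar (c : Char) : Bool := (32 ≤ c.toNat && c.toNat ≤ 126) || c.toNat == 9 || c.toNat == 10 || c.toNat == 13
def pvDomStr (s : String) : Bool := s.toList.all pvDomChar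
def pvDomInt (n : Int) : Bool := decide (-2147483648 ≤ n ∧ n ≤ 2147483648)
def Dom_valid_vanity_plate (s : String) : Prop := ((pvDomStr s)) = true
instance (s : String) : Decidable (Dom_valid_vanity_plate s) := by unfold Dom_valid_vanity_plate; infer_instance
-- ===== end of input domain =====

-- B replaces A's two-phase "scan to first digit, then bulk isdigit on the suffix"
-- with a single pass holding a seen_digit flag (objective: simpler).
-- ===== PORT A =====
-- loop over i in range(len(s)); at each step the suffix s[i:] is the list being recursed on
def pvGoA : List Char → Bool
  | [] => true
  | c :: rest =>
      if PySem.Chars.isdigit c then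
        if PySem.Chars.strIsdigit (c :: rest) then true else false
      else
        pvGoA rest

def valid_vanity_plate (s : String) : Bool := pvGoA s.toList

-- ===== PORT B =====
-- single pass with the seen_digit flag
def pvGoB : List Char → Bool → Bool
  | [], _ => true
  | c :: rest, seen =>
      if seen && !PySem.Chars.isdigit c then false
      else pvGoB rest (seen || PySem.Chars.isdigit c)

def valid_vanity_plate_alt (s : String) : Bool := pvGoB s.toList false

-- ===== PRECONDITION & SPEC =====
def Spec_valid_vanity_plate (s : String) (out : Bool) : Prop := out = valid_vanity_plate_alt s
instance (s : String) (out : Bool) : Decidable (Spec_valid_vanity_plate s out) := by unfold Spec_valid_vanity_plate; infer_instance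

-- ===== CLAIM (what is proved, stated in full; the proofs are below) =====
def Claim_equal_valid_vanity_plate : Prop := ∀ (s : String), Dom_valid_vanity_plate s → Spec_valid_vanity_plate s (valid_vanity_plate s)

-- ===== LEMMAS AND PROOFS =====

-- with seen_digit already true, B's loop accepts exactly an all-digit remainder
theorem pvGoB_true (cs : List Char) : pvGoB cs true = cs.all PySem.Chars.isdigit := by
  induction cs with
  | nil => rfl
  | cons c rest ih =>
      by_cases h : PySem.Chars.isdigit c = true <;> simp [pvGoB, h, ih]

theorem pvGoA_eq (cs : List Char) : pvGoA cs = pvGoB cs false := by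
  induction cs with
  | nil => rfl
  | cons c rest ih =>
      by_cases h : PySem.Chars.isdigit c = true
      · simp [pvGoA, pvGoB, h, pvGoB_true, PySem.Chars.strIsdigit]
        rw [Bool.eq_iff_iff]; simp [List.all_eq_true]
      · simp [pvGoA, pvGoB, h, ih]

-- ===== VERDICT (by name: the statement is the Claim_ definition above) =====
theorem valid_vanity_plate_spec : Claim_equal_valid_vanity_plate := by
  intro s _
  unfold Spec_valid_vanity_plate valid_vanity_plate valid_vanity_plate_alt
  exact pvGoA_eq s.toList
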